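-- pv_equiv track=rewrite | github.com/S-Stern/sigma_labs | pre-learning/game-of-life/game.py | count_live_neighbours
-- ===== SOURCE A (Python) =====
-- def count_live_neighbours(matrix: list, row: int, col: int) -> int:
--     height = len(matrix)
--     width = len(matrix[0])
--     return sum([
--             matrix[i][j]
--             if (i, j) != (row, col) and 0 <= i < height and 0 <= j < width
--             else 0
--             for i in range(row - 1, row + 2)
--             for j in range(col - 1, col + 2)
--             ])
-- ===== SOURCE B (Python) =====
-- def count_live_neighbours(matrix: list, row: int, col: int) -> int:
--     width = len(matrix[0])
--     total = 0
--     for i, _ in enumerate(matrix):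
--         if abs(i - row) <= 1:
--             for j in range(width):
--                 if abs(j - col) <= 1 and (i, j) != (row, col):
--                     total += matrix[i][j]
--     return total
-- ===== Notes on version B (the rewrite author's own statement) =====
-- stated objective: alternative
-- what changed: Replaces A's fixed 3x3 window comprehension (9 guarded index pairs around the cell) by a full-grid scan: an accumulator loop over enumerate(matrix) and range(width) that adds a cell exactly when its Chebyshev distance to (row, col) is <= 1 and it is not the center.
import Mathlib
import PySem

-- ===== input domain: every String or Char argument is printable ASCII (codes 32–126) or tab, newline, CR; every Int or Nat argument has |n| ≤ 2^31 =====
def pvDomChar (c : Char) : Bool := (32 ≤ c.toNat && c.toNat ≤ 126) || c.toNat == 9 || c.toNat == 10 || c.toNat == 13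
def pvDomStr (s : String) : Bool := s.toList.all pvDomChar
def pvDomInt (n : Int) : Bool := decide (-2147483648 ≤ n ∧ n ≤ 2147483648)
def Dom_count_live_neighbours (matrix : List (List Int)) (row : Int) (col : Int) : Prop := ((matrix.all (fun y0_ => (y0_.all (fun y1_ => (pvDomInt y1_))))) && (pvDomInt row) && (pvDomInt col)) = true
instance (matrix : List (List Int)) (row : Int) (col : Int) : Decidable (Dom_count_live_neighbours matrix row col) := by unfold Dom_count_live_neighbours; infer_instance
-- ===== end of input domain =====

-- B replaces A's fixed 3x3 window comprehension by a full-grid accumulator scan filtered by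
-- Chebyshev distance <= 1 to the center (alternative decomposition, not faster).


-- matrix[i][j]; both indexings are in range under Pre_ (default 0 only outside it)
def pvCell (matrix : List (List Int)) (i j : Int) : Int :=
  PySem.List.pyGetD (PySem.List.pyGetD matrix i []) j 0

-- ===== PORT A =====
def count_live_neighbours (matrix : List (List Int)) (row : Int) (col : Int) : Int :=
  let height : Int := matrix.length
  let width : Int := ((PySem.List.pyGetD matrix 0 []).length : Int)
  ((PySem.List.pyRange (row - 1) (row + 2) 1).flatMap (fun i =>
    (PySem.List.pyRange (col - 1) (col + 2) 1).map (fun j =>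
      if (i, j) ≠ (row, col) ∧ (0 ≤ i ∧ i < height) ∧ (0 ≤ j ∧ j < width)
      then pvCell matrix i j else 0))).sum

-- ===== PORT B =====
-- full-grid scan: for i,_ in enumerate(matrix): if abs(i-row)<=1: for j in range(width): …
def count_live_neighbours_alt (matrix : List (List Int)) (row : Int) (col : Int) : Int :=
  let width : Int := ((PySem.List.pyGetD matrix 0 []).length : Int)
  (PySem.List.enumerate matrix 0).foldl (fun total p =>
    if (p.1 - row).natAbs ≤ 1 then
      (PySem.List.pyRange 0 width 1).foldl (fun total2 j =>
        if (j - col).natAbs ≤ 1 ∧ (p.1, j) ≠ (row, col)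
        then total2 + pvCell matrix p.1 j else total2) total
    else total) 0

-- ===== PRECONDITION & SPEC =====
-- Pre_ excludes exactly the inputs on which Python A raises IndexError: the empty matrix, and
-- ragged matrices where some summed (in-window, in-bounds, non-center) cell lies beyond its
-- row's actual length; B indexes exactly the same cells and raises there too.
def Pre_count_live_neighbours (matrix : List (List Int)) (row : Int) (col : Int) : Prop :=
  matrix ≠ [] ∧
  ∀ i ∈ [row - 1, row, row + 1], 0 ≤ i → i < (matrix.length : Int) →
    ∀ j ∈ [col - 1, col, col + 1], 0 ≤ j → j < ((matrix.headD []).length : Int) →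
      (i, j) ≠ (row, col) → j < ((PySem.List.pyGetD matrix i []).length : Int)
instance (matrix : List (List Int)) (row : Int) (col : Int) : Decidable (Pre_count_live_neighbours matrix row col) := by unfold Pre_count_live_neighbours; infer_instance
def pvWitness_count_live_neighbours : List (List Int) × Int × Int := ([[1, 0, 1], [0, 1, 0], [1, 1, 0]], 1, 1)

def Spec_count_live_neighbours (matrix : List (List Int)) (row : Int) (col : Int) (out : Int) : Prop := out = count_live_neighbours_alt matrix row col
instance (matrix : List (List Int)) (row : Int) (col : Int) (out : Int) : Decidable (Spec_count_live_neighbours matrix row col out) := by unfold Spec_count_live_neighbours; infer_instance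

-- ===== CLAIM (what is proved, stated in full; the proofs are below) =====
def Claim_equal_count_live_neighbours : Prop := ∀ (matrix : List (List Int)) (row : Int) (col : Int), Dom_count_live_neighbours matrix row col → Pre_count_live_neighbours matrix row col → Spec_count_live_neighbours matrix row col (count_live_neighbours matrix row col)

-- ===== LEMMAS AND PROOFS =====

-- the unclamped 3-element window range, spelt out
lemma pv_window3 (r : Int) : PySem.List.pyRange (r - 1) (r + 2) 1 = [r - 1, r, r + 1] := by
  rw [PySem.List.pyRange_one_cons (by omega), PySem.List.pyRange_one_cons (by omega),
      PySem.List.pyRange_one_cons (by omega), PySem.List.pyRange_one_eq_nil (by omega)]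
  norm_num

-- an accumulate-if loop is the start value plus a sum of guarded terms
lemma pv_foldl_ite_add {α : Type} (l : List α) (P : α → Prop) [DecidablePred P]
    (f : α → Int) (a : Int) :
    l.foldl (fun acc x => if P x then acc + f x else acc) a
      = a + (l.map (fun x => if P x then f x else 0)).sum := by
  induction l generalizing a with
  | nil => simp
  | cons x xs ih =>
    simp only [List.foldl_cons, List.map_cons, List.sum_cons, ih]
    split_ifs <;> ring

-- a guarded sum over range(0, n) with support inside [c-1, c+1] is the sum over the clamped window
lemma pv_range_to_window (n c : Int) (Q : Int → Prop) [DecidablePred Q] (f : Int → Int)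
    (hQ : ∀ i, Q i → c - 1 ≤ i ∧ i ≤ c + 1) :
    ((PySem.List.pyRange 0 n 1).map (fun i => if Q i then f i else 0)).sum
      = ((PySem.List.pyRange (max 0 (c - 1)) (min n (c + 2)) 1).map
          (fun i => if Q i then f i else 0)).sum := by
  have hzero : ∀ l : List Int, (∀ i ∈ l, ¬ Q i) →
      ((l.map (fun i => if Q i then f i else 0)).sum = 0) := by
    intro l hl
    apply List.sum_eq_zero
    intro x hx
    obtain ⟨i, hi, rfl⟩ := List.mem_map.mp hx
    rw [if_neg (hl i hi)]
  by_cases hn : n ≤ 0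
  · rw [PySem.List.pyRange_one_eq_nil hn, PySem.List.pyRange_one_eq_nil (by omega)]
  · by_cases hab : min n (c + 2) ≤ max 0 (c - 1)
    · rw [PySem.List.pyRange_one_eq_nil hab]
      simp only [List.map_nil, List.sum_nil]
      apply hzero
      intro i hi hQi
      rw [PySem.List.mem_pyRange_one] at hi
      have := hQ i hQi
      omega
    · have hL : ((PySem.List.pyRange 0 (max 0 (c - 1)) 1).map
          (fun i => if Q i then f i else 0)).sum = 0 := by
        apply hzero
        intro i hi hQi
        rw [PySem.List.mem_pyRange_one] at hi
        have := hQ i hQi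
        omega
      have hR : ((PySem.List.pyRange (min n (c + 2)) n 1).map
          (fun i => if Q i then f i else 0)).sum = 0 := by
        apply hzero
        intro i hi hQi
        rw [PySem.List.mem_pyRange_one] at hi
        have := hQ i hQi
        omega
      rw [PySem.List.pyRange_one_append 0 (max 0 (c - 1)) n (by omega) (by omega),
          PySem.List.pyRange_one_append (max 0 (c - 1)) (min n (c + 2)) n (by omega) (by omega),
          List.map_append, List.map_append, List.sum_append, List.sum_append, hL, hR]
      ring

-- summing over the clamped window equals summing guarded terms over the full window
lemma pv_clamp3 (h r : Int) (f : Int → Int) :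
    ((PySem.List.pyRange (max 0 (r - 1)) (min h (r + 2)) 1).map f).sum
    = ((if 0 ≤ r - 1 ∧ r - 1 < h then f (r - 1) else 0)
      + (if 0 ≤ r ∧ r < h then f r else 0)
      + (if 0 ≤ r + 1 ∧ r + 1 < h then f (r + 1) else 0)) := by
  rw [PySem.List.pyRange_one]
  by_cases c1 : 0 ≤ r - 1 ∧ r - 1 < h <;>
  by_cases c2 : 0 ≤ r ∧ r < h <;>
  by_cases c3 : 0 ≤ r + 1 ∧ r + 1 < h
  · rw [if_pos c1, if_pos c2, if_pos c3,
      show (min h (r + 2) - max 0 (r - 1)).toNat = 3 by omega,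
      show max 0 (r - 1) = r - 1 by omega]
    simp [List.range_succ]
    rw [show r - 1 + 2 = r + 1 by ring]; ring
  · rw [if_pos c1, if_pos c2, if_neg c3,
      show (min h (r + 2) - max 0 (r - 1)).toNat = 2 by omega,
      show max 0 (r - 1) = r - 1 by omega]
    simp [List.range_succ]
  · omega
  · rw [if_pos c1, if_neg c2, if_neg c3,
      show (min h (r + 2) - max 0 (r - 1)).toNat = 1 by omega,
      show max 0 (r - 1) = r - 1 by omega]
    simp [List.range_succ]
  · rw [if_neg c1, if_pos c2, if_pos c3,
      show (min h (r + 2) - max 0 (r - 1)).toNat = 2 by omega,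
      show max 0 (r - 1) = r by omega]
    simp [List.range_succ]
  · rw [if_neg c1, if_pos c2, if_neg c3,
      show (min h (r + 2) - max 0 (r - 1)).toNat = 1 by omega,
      show max 0 (r - 1) = r by omega]
    simp [List.range_succ]
  · rw [if_neg c1, if_neg c2, if_pos c3,
      show (min h (r + 2) - max 0 (r - 1)).toNat = 1 by omega,
      show max 0 (r - 1) = r + 1 by omega]
    simp [List.range_succ]
  · rw [if_neg c1, if_neg c2, if_neg c3,
      show (min h (r + 2) - max 0 (r - 1)).toNat = 0 by omega]
    simp

-- a guarded 3-term sum splits into three guarded terms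
lemma pv_ite_add3 (P : Prop) [Decidable P] (a b c : Int) :
    (if P then a + b + c else (0:Int))
      = (if P then a else 0) + (if P then b else 0) + (if P then c else 0) := by
  split_ifs <;> ring

-- rewrite a guard by a propositional equivalence
lemma pv_ite_iff (P Q : Prop) [Decidable P] [Decidable Q] (v : Int) (h : P ↔ Q) :
    (if P then v else (0:Int)) = if Q then v else 0 := by
  split_ifs <;> tauto

-- A's per-cell guard, reordered to B's shape
lemma pv_term (h w r c i j : Int) (v : Int) :
    (if (i, j) ≠ (r, c) ∧ (0 ≤ i ∧ i < h) ∧ (0 ≤ j ∧ j < w) then v else (0:Int))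
      = (if (0 ≤ i ∧ i < h) ∧ ((0 ≤ j ∧ j < w) ∧ (i, j) ≠ (r, c)) then v else 0) :=
  pv_ite_iff _ _ _ (by tauto)

-- collapse a nested guard whose middle conjunct holds
lemma pv_nest (A B C : Prop) [Decidable A] [Decidable B] [Decidable C] (v : Int) (hB : B) :
    (if A then (if B ∧ C then v else (0:Int)) else 0) = if A ∧ C then v else 0 := by
  by_cases hA : A <;> by_cases hC : C <;> simp [hA, hB, hC]

-- B unfolded to a nested guarded sum over the whole index grid
lemma pv_B_eq (matrix : List (List Int)) (row col : Int) :
    count_live_neighbours_alt matrix row col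
      = ((PySem.List.pyRange 0 (matrix.length : Int) 1).map (fun i =>
          if (i - row).natAbs ≤ 1 then
            ((PySem.List.pyRange 0 ((PySem.List.pyGetD matrix 0 []).length : Int) 1).map
              (fun j => if (j - col).natAbs ≤ 1 ∧ (i, j) ≠ (row, col)
                        then pvCell matrix i j else 0)).sum
          else 0)).sum := by
  simp only [count_live_neighbours_alt]
  have step1 : (PySem.List.enumerate matrix 0).foldl (fun total p =>
        if (p.1 - row).natAbs ≤ 1 then
          (PySem.List.pyRange 0 ((PySem.List.pyGetD matrix 0 []).length : Int) 1).foldl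
            (fun total2 j => if (j - col).natAbs ≤ 1 ∧ (p.1, j) ≠ (row, col)
                             then total2 + pvCell matrix p.1 j else total2) total
        else total) 0
      = (PySem.List.enumerate matrix 0).foldl (fun total p =>
        if (p.1 - row).natAbs ≤ 1 then
          total + ((PySem.List.pyRange 0 ((PySem.List.pyGetD matrix 0 []).length : Int) 1).map
            (fun j => if (j - col).natAbs ≤ 1 ∧ (p.1, j) ≠ (row, col)
                      then pvCell matrix p.1 j else 0)).sum
        else total) 0 := by
    apply PySem.List.foldl_congr_mem
    intro acc p _
    split_ifs with hq
    · exact pv_foldl_ite_add _ _ _ _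
    · rfl
  rw [step1,
      pv_foldl_ite_add (PySem.List.enumerate matrix 0)
        (fun p : Int × List Int => (p.1 - row).natAbs ≤ 1)
        (fun p : Int × List Int =>
          ((PySem.List.pyRange 0 ((PySem.List.pyGetD matrix 0 []).length : Int) 1).map
            (fun j => if (j - col).natAbs ≤ 1 ∧ (p.1, j) ≠ (row, col)
                      then pvCell matrix p.1 j else 0)).sum) 0,
      zero_add,
      show (fun p : Int × List Int =>
          if (p.1 - row).natAbs ≤ 1 then
            ((PySem.List.pyRange 0 ((PySem.List.pyGetD matrix 0 []).length : Int) 1).map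
              (fun j => if (j - col).natAbs ≤ 1 ∧ (p.1, j) ≠ (row, col)
                        then pvCell matrix p.1 j else 0)).sum
          else 0)
        = (fun i : Int =>
          if (i - row).natAbs ≤ 1 then
            ((PySem.List.pyRange 0 ((PySem.List.pyGetD matrix 0 []).length : Int) 1).map
              (fun j => if (j - col).natAbs ≤ 1 ∧ (i, j) ≠ (row, col)
                        then pvCell matrix i j else 0)).sum
          else 0) ∘ (fun p : Int × List Int => p.1) from rfl,
      ← List.map_map, PySem.List.map_fst_enumerate]
  simp

set_option maxHeartbeats 1000000 in
lemma pv_ports_agree (matrix : List (List Int)) (row col : Int) :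
    count_live_neighbours matrix row col = count_live_neighbours_alt matrix row col := by
  have hs : ∀ i : Int,
      (if (i - row).natAbs ≤ 1 then
        ((PySem.List.pyRange 0 ((PySem.List.pyGetD matrix 0 []).length : Int) 1).map
          (fun j => if (j - col).natAbs ≤ 1 ∧ (i, j) ≠ (row, col)
                    then pvCell matrix i j else 0)).sum
      else 0)
      = (if (i - row).natAbs ≤ 1 then
          ((if (0 ≤ col - 1 ∧ col - 1 < ((PySem.List.pyGetD matrix 0 []).length : Int))
              ∧ (i, col - 1) ≠ (row, col) then pvCell matrix i (col - 1) else 0)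
          + (if (0 ≤ col ∧ col < ((PySem.List.pyGetD matrix 0 []).length : Int))
              ∧ (i, col) ≠ (row, col) then pvCell matrix i col else 0)
          + (if (0 ≤ col + 1 ∧ col + 1 < ((PySem.List.pyGetD matrix 0 []).length : Int))
              ∧ (i, col + 1) ≠ (row, col) then pvCell matrix i (col + 1) else 0))
        else 0) := by
    intro i
    by_cases hi : (i - row).natAbs ≤ 1
    · rw [if_pos hi, if_pos hi,
          pv_range_to_window ((PySem.List.pyGetD matrix 0 []).length : Int) col
            (fun j => (j - col).natAbs ≤ 1 ∧ (i, j) ≠ (row, col))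
            (fun j => pvCell matrix i j)
            (by rintro j ⟨hj, -⟩; omega),
          pv_clamp3]
      rw [pv_nest (0 ≤ col - 1 ∧ col - 1 < ((PySem.List.pyGetD matrix 0 []).length : Int))
            ((col - 1 - col).natAbs ≤ 1) ((i, col - 1) ≠ (row, col))
            (pvCell matrix i (col - 1)) (by omega),
          pv_nest (0 ≤ col ∧ col < ((PySem.List.pyGetD matrix 0 []).length : Int))
            ((col - col).natAbs ≤ 1) ((i, col) ≠ (row, col))
            (pvCell matrix i col) (by omega),
          pv_nest (0 ≤ col + 1 ∧ col + 1 < ((PySem.List.pyGetD matrix 0 []).length : Int))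
            ((col + 1 - col).natAbs ≤ 1) ((i, col + 1) ≠ (row, col))
            (pvCell matrix i (col + 1)) (by omega)]
    · rw [if_neg hi, if_neg hi]
  rw [pv_B_eq,
      pv_range_to_window (matrix.length : Int) row
        (fun i => (i - row).natAbs ≤ 1)
        (fun i => ((PySem.List.pyRange 0 ((PySem.List.pyGetD matrix 0 []).length : Int) 1).map
          (fun j => if (j - col).natAbs ≤ 1 ∧ (i, j) ≠ (row, col)
                    then pvCell matrix i j else 0)).sum)
        (by intro i hi; omega),
      pv_clamp3]
  rw [hs (row - 1), hs row, hs (row + 1),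
      if_pos (show (row - 1 - row).natAbs ≤ 1 by omega),
      if_pos (show (row - row).natAbs ≤ 1 by omega),
      if_pos (show (row + 1 - row).natAbs ≤ 1 by omega)]
  simp only [count_live_neighbours, pv_window3, List.flatMap_cons, List.flatMap_nil,
    List.map_cons, List.map_nil, List.sum_append, List.sum_cons, List.sum_nil,
    List.append_nil, add_zero, pv_term, pv_ite_add3, ← ite_and]
  ring

-- ===== VERDICT (by name: the statement is the Claim_ definition above) =====
theorem count_live_neighbours_spec : Claim_equal_count_live_neighbours := by
  intro matrix row col _ _
  unfold Spec_count_live_neighbours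
  exact pv_ports_agree matrix row col
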